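-- pv_equiv track=rewrite | github.com/shahnehashah2/Challenge-Problems | puzzle-magicBricks.py | Make_bricks
-- ===== SOURCE A (Python) =====
-- import itertools
--
-- def Make_bricks(small, big, goal):
--     if small*3 + big*5 < goal:
--         return False
--     new_list = small*[3]+big*[5]
--     for n in range(0, len(new_list) + 1):
--         for subset in itertools.combinations(new_list, n):
--             if (sum(subset) == goal):
--                 return True
--     return False
-- ===== SOURCE B (Python) =====
-- def Make_bricks(small, big, goal):
--     if small*3 + big*5 < goal:
--         return False
--     s, b = max(small, 0), max(big, 0)
--     for five in range(b + 1):
--         rem = goal - 5*five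
--         if rem >= 0 and rem % 3 == 0 and rem <= 3*s:
--             return True
--     return False
-- ===== Notes on version B (the rewrite author's own statement) =====
-- stated objective: faster
-- what changed: Replaces the exponential enumeration of all subsets of the multiset of bricks (itertools.combinations for every size) by a single loop over the possible count of 5-bricks, checking that the remainder is a nonnegative multiple of 3 within the stock of 3-bricks; intended as asymptotically faster (O(big) vs O(2^(small+big))); measured: a timing run found A timing out already at n=16 while B returned instantly, so no ratio at a common largest size could be read.
import Mathlib
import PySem

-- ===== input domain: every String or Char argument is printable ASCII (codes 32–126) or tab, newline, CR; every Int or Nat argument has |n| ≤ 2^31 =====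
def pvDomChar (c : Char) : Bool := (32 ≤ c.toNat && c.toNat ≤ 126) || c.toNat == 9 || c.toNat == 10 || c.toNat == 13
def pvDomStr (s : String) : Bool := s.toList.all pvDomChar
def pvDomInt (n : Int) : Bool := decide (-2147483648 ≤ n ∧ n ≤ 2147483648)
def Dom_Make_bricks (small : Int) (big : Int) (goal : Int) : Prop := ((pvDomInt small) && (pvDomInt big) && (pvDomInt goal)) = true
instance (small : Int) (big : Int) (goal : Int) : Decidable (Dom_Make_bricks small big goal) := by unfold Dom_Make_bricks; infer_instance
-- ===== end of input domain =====

-- B replaces A's exponential subset enumeration by one loop over the number of 5-bricks used.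

-- ===== PORT A =====
-- literal transliteration of A: guard, build small*[3]+big*[5], try every subset size
def Make_bricks (small : Int) (big : Int) (goal : Int) : Bool :=
  if small * 3 + big * 5 < goal then false
  else
    let newList := PySem.List.pyRepeat [(3 : Int)] small ++ PySem.List.pyRepeat [(5 : Int)] big
    (List.range (newList.length + 1)).any (fun n =>
      (PySem.List.combinations newList n).any (fun subset => subset.sum == goal))

-- ===== PORT B =====
def Make_bricks_alt (small : Int) (big : Int) (goal : Int) : Bool :=
  if small * 3 + big * 5 < goal then false
  else
    let s := max small 0
    let b := max big 0
    (PySem.List.pyRange 0 (b + 1) 1).any (fun five =>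
      let rem := goal - 5 * five
      decide (0 ≤ rem) && rem % 3 == 0 && decide (rem ≤ 3 * s))

-- ===== PRECONDITION & SPEC =====
def Spec_Make_bricks (small : Int) (big : Int) (goal : Int) (out : Bool) : Prop := out = Make_bricks_alt small big goal
instance (small : Int) (big : Int) (goal : Int) (out : Bool) : Decidable (Spec_Make_bricks small big goal out) := by unfold Spec_Make_bricks; infer_instance

-- ===== CLAIM (what is proved, stated in full; the proofs are below) =====
def Claim_equal_Make_bricks : Prop := ∀ (small : Int) (big : Int) (goal : Int), Dom_Make_bricks small big goal → Spec_Make_bricks small big goal (Make_bricks small big goal)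

-- ===== LEMMAS AND PROOFS =====

-- sums over a sublist of (replicate s 3 ++ replicate b 5) are exactly 3*i + 5*j with i ≤ s, j ≤ b
lemma exists_sublist_sum_iff (s b : Nat) (g : Int) :
    (∃ l : List Int, l.Sublist (List.replicate s (3 : Int) ++ List.replicate b 5) ∧ l.sum = g) ↔
    ∃ i j : Nat, i ≤ s ∧ j ≤ b ∧ 3 * (i : Int) + 5 * (j : Int) = g := by
  constructor
  · rintro ⟨l, hl, hsum⟩
    rw [List.sublist_append_iff] at hl
    obtain ⟨l1, l2, rfl, h1, h2⟩ := hl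
    rw [List.sublist_replicate_iff] at h1 h2
    obtain ⟨i, hi, rfl⟩ := h1
    obtain ⟨j, hj, rfl⟩ := h2
    refine ⟨i, j, hi, hj, ?_⟩
    simp only [List.sum_append, List.sum_replicate, nsmul_eq_mul] at hsum
    linarith [hsum]
  · rintro ⟨i, j, hi, hj, hg⟩
    refine ⟨List.replicate i (3 : Int) ++ List.replicate j 5, ?_, ?_⟩
    · exact List.Sublist.append ((List.replicate_sublist_replicate _).2 hi)
        ((List.replicate_sublist_replicate _).2 hj)
    · simp only [List.sum_append, List.sum_replicate, nsmul_eq_mul]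
      linarith [hg]

-- A's double any = existence of a sublist with the right sum
lemma makeA_body_iff (s b : Nat) (g : Int) :
    ((List.range ((List.replicate s (3 : Int) ++ List.replicate b 5).length + 1)).any (fun n =>
      (PySem.List.combinations (List.replicate s (3 : Int) ++ List.replicate b 5) n).any
        (fun subset => subset.sum == g)) = true) ↔
    ∃ l : List Int, l.Sublist (List.replicate s (3 : Int) ++ List.replicate b 5) ∧ l.sum = g := by
  simp only [List.any_eq_true, List.mem_range, PySem.List.mem_combinations_iff, beq_iff_eq]
  constructor
  · rintro ⟨n, _, l, ⟨hsub, _⟩, hsum⟩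
    exact ⟨l, hsub, hsum⟩
  · rintro ⟨l, hsub, hsum⟩
    exact ⟨l.length, Nat.lt_succ_of_le hsub.length_le, l, ⟨hsub, rfl⟩, hsum⟩

-- ===== VERDICT (by name: the statement is the Claim_ definition above) =====
theorem Make_bricks_spec : Claim_equal_Make_bricks := by
  intro small big goal _
  unfold Spec_Make_bricks Make_bricks Make_bricks_alt
  split
  · rfl
  · simp only [PySem.List.pyRepeat_singleton]
    rw [Bool.eq_iff_iff, makeA_body_iff small.toNat big.toNat goal, exists_sublist_sum_iff]
    simp only [List.any_eq_true, PySem.List.mem_pyRange_one, Bool.and_eq_true, decide_eq_true_eq,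
      beq_iff_eq]
    constructor
    · rintro ⟨i, j, hi, hj, hg⟩
      refine ⟨(j : Int), ?_, ?_⟩
      · exact ⟨by omega, by omega⟩
      · exact ⟨⟨by omega, by omega⟩, by omega⟩
    · rintro ⟨f, ⟨hf0, hfb⟩, ⟨hrem0, hmod⟩, hrems⟩
      exact ⟨((goal - 5 * f) / 3).toNat, f.toNat, by omega, by omega, by omega⟩
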